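-- pv_equiv track=rewrite | github.com/1MiKHalyCH1/aoc2018 | day08/solver.py | parse
-- ===== SOURCE A (Python) =====
-- def parse(data):
--     children, metas, data = *data[:2], data[2:]
--     child_meta = []
--     values = []
--
--     for _ in range(children):
--         score, value, data = parse(data)
--         child_meta.append(score)
--         values.append(value)
--
--     score, meta = sum(data[:metas]), data[metas:]
--
--     if not children: return score, score, meta
--     return score + sum(child_meta), sum(values[i - 1] for i in data[:metas] if 1 <= i <= len(values)), meta
-- ===== SOURCE B (Python) =====
-- def parse(data):
--     # Iterative parse: explicit stack of partially-built node frames instead of recursion.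
--     kids, metas, data = data[0], data[1], data[2:]
--     scores, values = [], []
--     stack = []
--     while True:
--         if kids > len(scores):
--             # this node still has children to parse: start the next one
--             stack.append((kids, metas, scores, values))
--             kids, metas, data = data[0], data[1], data[2:]
--             scores, values = [], []
--             continue
--         # node complete: read its metadata and compute its score and value
--         md, data = data[:metas], data[metas:]
--         s = sum(md)
--         if kids == 0:
--             score = value = s
--         else:
--             score = s + sum(scores)
--             value = sum(values[i - 1] for i in md if 1 <= i <= len(values))
--         if not stack:
--             return score, value, data
--         kids, metas, scores, values = stack.pop()
--         scores.append(score)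
--         values.append(value)
-- ===== Notes on version B (the rewrite author's own statement) =====
-- stated objective: alternative
-- what changed: Replaces A's recursive descent by an iterative parse with an explicit stack of partially built node frames (pending-children header, metadata count, child scores, child values); same return value wherever A returns, and Pre_ excludes only the inputs on which A raises (truncated header).
import Mathlib
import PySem

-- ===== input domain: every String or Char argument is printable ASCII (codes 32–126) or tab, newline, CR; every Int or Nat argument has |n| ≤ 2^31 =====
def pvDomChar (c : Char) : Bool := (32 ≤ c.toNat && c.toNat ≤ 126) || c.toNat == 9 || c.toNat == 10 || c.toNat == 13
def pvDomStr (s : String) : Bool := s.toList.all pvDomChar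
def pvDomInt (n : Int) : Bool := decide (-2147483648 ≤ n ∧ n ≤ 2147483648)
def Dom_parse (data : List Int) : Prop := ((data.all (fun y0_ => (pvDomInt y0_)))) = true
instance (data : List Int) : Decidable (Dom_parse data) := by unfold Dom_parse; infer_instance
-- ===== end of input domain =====

-- B replaces A's recursive descent by an iterative parse with an explicit stack of
-- partially built node frames (same return value wherever A returns).

-- ===== PORT A =====
-- Recursive descent exactly as in A: unpack the two header numbers (ValueError = none),
-- loop over range(children) parsing each child, then slice the metadata off the rest.
-- The fuel only makes the recursion structural; every call consumes at least two list
-- elements, so the fuel data.length + 1 supplied by `parse` never runs out when A returns.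
mutual
def parseLoopA (fuel n : Nat) (data childMeta values : List Int) :
    Option (List Int × List Int × List Int) :=
  match n with
  | 0 => some (childMeta, values, data)
  | n + 1 =>
    match parseAux fuel data with
    | none => none
    | some (score, value, data') =>
      parseLoopA fuel n data' (childMeta ++ [score]) (values ++ [value])
termination_by (fuel, n + 1)

def parseAux (fuel : Nat) (data : List Int) : Option (Int × Int × List Int) :=
  match fuel, data with
  | 0, _ => none
  | fuel + 1, children :: metas :: rest =>
    match parseLoopA fuel children.toNat rest [] [] with
    | none => none
    | some (childMeta, values, data) =>
      let score := (PySem.List.slice data none (some metas)).sum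
      let metaRest := PySem.List.slice data (some metas) none
      if children == 0 then some (score, score, metaRest)
      else
        some (score + childMeta.sum,
          (PySem.List.slice data none (some metas)).foldl
            (fun acc i =>
              if 1 ≤ i ∧ i ≤ (values.length : Int) then acc + values.getD (i - 1).toNat 0
              else acc) 0,
          metaRest)
  | _ + 1, _ => none
termination_by (fuel, 0)
end

def parse (data : List Int) : Int × Int × List Int :=
  (parseAux (data.length + 1) data).getD (0, 0, [])

-- ===== PORT B =====
-- Iterative parse (Source B): the `while True` loop as a recursion over the loop state
-- (current header kids/metas, accumulated child scores/values, remaining data, the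
-- stack of suspended frames).  Reading a header of a new child (the `kids > len(scores)`
-- branch) is charged one unit of fuel; with data.length + 1 it never runs out when B
-- returns.  Slices are the exact Python slices data[:metas] / data[metas:].
def loopB (fuel : Nat) (data : List Int) (kids metas : Int) (scores values : List Int)
    (stack : List (Int × Int × List Int × List Int)) : Option (Int × Int × List Int) :=
  if (scores.length : Int) < kids then
    -- this node still has children to parse: start the next one
    match fuel, data with
    | f + 1, k :: m :: rest =>
      loopB f rest k m [] [] ((kids, metas, scores, values) :: stack)
    | _, _ => none
  else
    -- node complete: read its metadata and compute its score and value
    let md := PySem.List.slice data none (some metas)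
    let data' := PySem.List.slice data (some metas) none
    let s := md.sum
    let score := if kids == 0 then s else s + scores.sum
    let value :=
      if kids == 0 then s
      else
        md.foldl
          (fun acc i =>
            if 1 ≤ i ∧ i ≤ (values.length : Int) then acc + values.getD (i - 1).toNat 0
            else acc) 0
    match stack with
    | [] => some (score, value, data')
    | (k, m, sc, vl) :: st => loopB fuel data' k m (sc ++ [score]) (vl ++ [value]) st
termination_by (fuel, stack.length)

def parse_alt (data : List Int) : Int × Int × List Int :=
  (match data with
   | k :: m :: rest => loopB (data.length + 1) rest k m [] [] []
   | _ => none).getD (0, 0, [])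

-- ===== PRECONDITION & SPEC =====
-- A raises ValueError exactly when some node's header is truncated (fewer than two numbers
-- remain where a header is expected), and B raises IndexError at the same point; Pre_
-- excludes exactly those inputs.  "Well-formed serialized tree" is a grammar-membership
-- condition and has no non-recursive characterisation, so Pre_ is stated via a minimal
-- structure-only walk `chk` (it records no sums, scores or values, only how much input
-- each node consumes).
def chkLoop (f : List Int → Option (List Int)) (n : Nat) (data : List Int) :
    Option (List Int) :=
  match n with
  | 0 => some data
  | n + 1 =>
    match f data with
    | none => none
    | some data' => chkLoop f n data'

def chk (fuel : Nat) (data : List Int) : Option (List Int) :=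
  match fuel, data with
  | 0, _ => none
  | fuel + 1, children :: metas :: rest =>
    match chkLoop (chk fuel) children.toNat rest with
    | none => none
    | some data => some (PySem.List.slice data (some metas) none)
  | _ + 1, _ => none

def Pre_parse (data : List Int) : Prop := (chk (data.length + 1) data).isSome = true
instance (data : List Int) : Decidable (Pre_parse data) := by unfold Pre_parse; infer_instance

def pvWitness_parse : List Int := [2, 3, 0, 3, 10, 11, 12, 1, 1, 0, 1, 99, 2, 1, 1, 2]

def Spec_parse (data : List Int) (out : Int × Int × List Int) : Prop := out = parse_alt data
instance (data : List Int) (out : Int × Int × List Int) : Decidable (Spec_parse data out) := by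
  unfold Spec_parse; infer_instance

-- ===== CLAIM (what is proved, stated in full; the proofs are below) =====
def Claim_equal_parse : Prop :=
  ∀ (data : List Int), Dom_parse data → Pre_parse data → Spec_parse data (parse data)

-- ===== LEMMAS AND PROOFS =====

-- B's state on entering a fresh node whose serialization starts `data` (the push branch
-- just after reading the header); proof-side abbreviation only.
def enterB (fuel : Nat) (data : List Int)
    (stack : List (Int × Int × List Int × List Int)) : Option (Int × Int × List Int) :=
  match data with
  | k :: m :: rest => loopB fuel rest k m [] [] stack
  | _ => none

-- B's state just after a node finished with (score, value, remaining data): return at the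
-- root, else resume the parent frame.
def popK (data : List Int) (score value : Int)
    (stack : List (Int × Int × List Int × List Int)) (fuel : Nat) :
    Option (Int × Int × List Int) :=
  match stack with
  | [] => some (score, value, data)
  | (k, m, sc, vl) :: st => loopB fuel data k m (sc ++ [score]) (vl ++ [value]) st

-- The simulation statement for one node, at A-fuel fA.
def L1Stmt (fA : Nat) : Prop :=
  ∀ (data : List Int) (s v : Int) (r : List Int)
    (stack : List (Int × Int × List Int × List Int)) (fB : Nat),
    parseAux fA data = some (s, v, r) → data.length ≤ fB + 2 →
    ∃ fB', r.length ≤ fB' ∧ enterB fB data stack = popK r s v stack fB'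

theorem parseAux_some_len (fA : Nat) (d : List Int) (r : Int × Int × List Int)
    (h : parseAux fA d = some r) : 2 ≤ d.length := by
  cases fA with
  | zero => simp [parseAux] at h
  | succ fA =>
    match d with
    | [] => simp [parseAux] at h
    | [x] => simp [parseAux] at h
    | a :: b :: t => simp

theorem slice_from_len_le (l : List Int) (m : Int) :
    (PySem.List.slice l (some m) none).length ≤ l.length := by
  simp only [PySem.List.slice, List.length_take, List.length_drop]
  omega

-- One step of B's loop, push branch: the current node still has children to parse.
theorem loopB_push (f : Nat) (rest : List Int) (k m kids metas : Int) (sc vl : List Int)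
    (stack : List (Int × Int × List Int × List Int)) (h : (sc.length : Int) < kids) :
    loopB (f + 1) (k :: m :: rest) kids metas sc vl stack
      = loopB f rest k m [] [] ((kids, metas, sc, vl) :: stack) := by
  conv_lhs => rw [loopB.eq_def]
  rw [if_pos h]

-- One step of B's loop, completion branch: the node is finished; it becomes a popK state.
theorem loopB_complete (fuel : Nat) (data : List Int) (kids metas : Int) (sc vl : List Int)
    (stack : List (Int × Int × List Int × List Int)) (h : ¬ (sc.length : Int) < kids) :
    loopB fuel data kids metas sc vl stack =
      popK (PySem.List.slice data (some metas) none)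
        (if kids == 0 then (PySem.List.slice data none (some metas)).sum
         else (PySem.List.slice data none (some metas)).sum + sc.sum)
        (if kids == 0 then (PySem.List.slice data none (some metas)).sum
         else (PySem.List.slice data none (some metas)).foldl
            (fun acc i =>
              if 1 ≤ i ∧ i ≤ (vl.length : Int) then acc + vl.getD (i - 1).toNat 0 else acc) 0)
        stack fuel := by
  conv_lhs => rw [loopB.eq_def]
  rw [if_neg h]
  cases stack <;> simp [popK]

theorem chkLoopEq (fA : Nat)
    (h : ∀ d, chk fA d = (parseAux fA d).map (fun t => t.2.2)) :
    ∀ (n : Nat) (d cm vl : List Int),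
      chkLoop (chk fA) n d = (parseLoopA fA n d cm vl).map (fun t => t.2.2) := by
  intro n
  induction n with
  | zero => intro d cm vl; simp [chkLoop, parseLoopA]
  | succ n ih =>
    intro d cm vl
    rw [chkLoop, parseLoopA, h d]
    cases hA : parseAux fA d with
    | none => simp
    | some t =>
      obtain ⟨s, v, d1⟩ := t
      simpa using ih d1 (cm ++ [s]) (vl ++ [v])

theorem chkEq : ∀ (fA : Nat) (d : List Int),
    chk fA d = (parseAux fA d).map (fun t => t.2.2) := by
  intro fA
  induction fA with
  | zero => intro d; simp [chk, parseAux]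
  | succ fA ih =>
    intro d
    match d with
    | [] => simp [chk, parseAux]
    | [c] => simp [chk, parseAux]
    | c :: mv :: rest =>
      rw [chk, parseAux, chkLoopEq fA ih]
      cases hp : parseLoopA fA c.toNat rest [] [] with
      | none => simp
      | some t =>
        obtain ⟨cm, vl, d1⟩ := t
        simp only [Option.map_some]
        split <;> simp

-- A's child loop appends exactly one score and one value per iteration.
theorem parseLoopA_len (fA : Nat) :
    ∀ (n : Nat) (d sc vl sc' vl' d' : List Int),
      parseLoopA fA n d sc vl = some (sc', vl', d') →
      sc'.length = sc.length + n ∧ vl'.length = vl.length + n := by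
  intro n
  induction n with
  | zero =>
    intro d sc vl sc' vl' d' h
    rw [parseLoopA] at h
    obtain ⟨rfl, rfl, rfl⟩ : sc = sc' ∧ vl = vl' ∧ d = d' := by simpa using h
    simp
  | succ n ih =>
    intro d sc vl sc' vl' d' h
    rw [parseLoopA] at h
    cases hA : parseAux fA d with
    | none => rw [hA] at h; simp at h
    | some t =>
      obtain ⟨s1, v1, d1⟩ := t
      rw [hA] at h
      have := ih d1 (sc ++ [s1]) (vl ++ [v1]) sc' vl' d' h
      simp only [List.length_append, List.length_cons, List.length_nil] at this
      omega

-- Simulation of A's child loop by B's main loop: while a frame still has children to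
-- parse, B parses the next child and appends its (score, value) exactly as A's loop does.
theorem simLoop (fA : Nat) (hL1 : L1Stmt fA) :
    ∀ (n : Nat) (d sc vl sc' vl' d' : List Int) (kids metas : Int)
      (stack : List (Int × Int × List Int × List Int)) (fB : Nat),
      0 ≤ kids → kids.toNat = sc.length + n →
      parseLoopA fA n d sc vl = some (sc', vl', d') →
      d.length ≤ fB →
      ∃ fB', d'.length ≤ fB' ∧
        loopB fB d kids metas sc vl stack = loopB fB' d' kids metas sc' vl' stack := by
  intro n
  induction n with
  | zero =>
    intro d sc vl sc' vl' d' kids metas stack fB _ _ hp hlen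
    rw [parseLoopA] at hp
    obtain ⟨rfl, rfl, rfl⟩ : sc = sc' ∧ vl = vl' ∧ d = d' := by simpa using hp
    exact ⟨fB, hlen, rfl⟩
  | succ n ih =>
    intro d sc vl sc' vl' d' kids metas stack fB hk0 hkn hp hlen
    rw [parseLoopA] at hp
    cases hA : parseAux fA d with
    | none => rw [hA] at hp; simp at hp
    | some t =>
      obtain ⟨s1, v1, d1⟩ := t
      rw [hA] at hp
      simp only at hp
      have hd2 : 2 ≤ d.length := parseAux_some_len fA d _ hA
      obtain ⟨f, rfl⟩ : ∃ f, fB = f + 1 := ⟨fB - 1, by omega⟩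
      obtain ⟨k, m, rest, rfl⟩ : ∃ k m rest, d = k :: m :: rest := by
        match d with
        | k :: m :: rest => exact ⟨k, m, rest, rfl⟩
      obtain ⟨fB1, hr1, hstep⟩ :=
        hL1 (k :: m :: rest) s1 v1 d1 ((kids, metas, sc, vl) :: stack) f hA (by omega)
      have htest : (sc.length : Int) < kids := by omega
      rw [loopB_push f rest k m kids metas sc vl stack htest]
      simp only [enterB] at hstep
      rw [hstep]
      simp only [popK]
      exact ih d1 (sc ++ [s1]) (vl ++ [v1]) sc' vl' d' kids metas stack fB1 hk0
        (by simp only [List.length_append, List.length_cons, List.length_nil]; omega) hp hr1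

theorem simAux : ∀ fA : Nat, L1Stmt fA := by
  intro fA
  induction fA with
  | zero =>
    intro data s v r stack fB hA _
    simp [parseAux] at hA
  | succ fA ih =>
    intro data s v r stack fB hA hlen
    match data with
    | [] => simp [parseAux] at hA
    | [c] => simp [parseAux] at hA
    | c :: mv :: rest =>
      rw [parseAux] at hA
      cases hpl : parseLoopA fA c.toNat rest [] [] with
      | none => rw [hpl] at hA; simp at hA
      | some t =>
        obtain ⟨cm, vl, d1⟩ := t
        rw [hpl] at hA
        simp only at hA
        simp only [List.length_cons] at hlen
        by_cases hc : c ≤ 0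
        · -- no children are parsed (children = 0, or children < 0 and range() is empty)
          have hcz : c.toNat = 0 := by omega
          rw [hcz, parseLoopA] at hpl
          obtain ⟨rfl, rfl, rfl⟩ : ([] : List Int) = cm ∧ ([] : List Int) = vl ∧ rest = d1 := by
            simpa using hpl
          refine ⟨fB, ?_, ?_⟩
          · -- r.length ≤ fB
            have hr : r = PySem.List.slice rest (some mv) none := by
              by_cases hb : (c == 0) = true <;> simp [hb] at hA <;> exact hA.2.2.symm
            have := slice_from_len_le rest mv
            rw [hr]; omega
          · simp only [enterB]
            rw [loopB_complete fB rest c mv [] [] stack (by simp; omega)]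
            by_cases hb : (c == 0) = true <;>
              simp only [hb] at hA ⊢ <;>
              simp only [if_true, if_false, Bool.false_eq_true] at hA ⊢ <;>
              rw [Option.some.injEq, Prod.mk.injEq, Prod.mk.injEq] at hA <;>
              obtain ⟨rfl, rfl, rfl⟩ := hA <;>
              rfl
        · -- node with children: simulate the loop over them, then complete the node
          have hb : (c == 0) = false := by simp; omega
          simp only [hb, Bool.false_eq_true, if_false] at hA
          rw [Option.some.injEq, Prod.mk.injEq, Prod.mk.injEq] at hA
          obtain ⟨rfl, rfl, rfl⟩ := hA
          obtain ⟨fB1, hd1, hloop⟩ :=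
            simLoop fA ih c.toNat rest [] [] cm vl d1 c mv stack fB (by omega)
              (by simp) hpl (by omega)
          have hcm : cm.length = c.toNat := by
            have := parseLoopA_len fA c.toNat rest [] [] cm vl d1 hpl
            simpa using this.1
          refine ⟨fB1, ?_, ?_⟩
          · have := slice_from_len_le d1 mv
            omega
          · simp only [enterB]
            rw [hloop, loopB_complete fB1 d1 c mv cm vl stack (by rw [hcm]; omega)]
            simp only [hb, Bool.false_eq_true, if_false]

-- ===== VERDICT (by name: the statement is the Claim_ definition above) =====
theorem parse_spec : Claim_equal_parse := by
  intro data hDom hPre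
  unfold Pre_parse at hPre
  rw [chkEq] at hPre
  have h1 : (parseAux (data.length + 1) data).isSome = true := by
    cases h : parseAux (data.length + 1) data <;> simp [h] at hPre ⊢
  obtain ⟨⟨s, v, r⟩, hA⟩ := Option.isSome_iff_exists.mp h1
  obtain ⟨fB', _, heq⟩ :=
    simAux (data.length + 1) data s v r [] (data.length + 1) hA (by omega)
  obtain ⟨k, m, rest, rfl⟩ : ∃ k m rest, data = k :: m :: rest := by
    have := parseAux_some_len _ data _ hA
    match data with
    | k :: m :: rest => exact ⟨k, m, rest, rfl⟩
  unfold Spec_parse parse parse_alt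
  rw [hA]
  simp only [enterB] at heq
  show (s, v, r) = (loopB ((k :: m :: rest).length + 1) rest k m [] [] []).getD (0, 0, [])
  rw [heq]
  simp [popK]
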